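-- pv_equiv track=rewrite | github.com/martoro/csv-tools | csvselectcols.py | header_indices
-- ===== SOURCE A (Python) =====
-- def header_indices(header, columns):
--     """Find the indices in the header of the given columns.
--
--     Args:
--       header: List of all column names in the csv file.
--       columns: List of columns to select/drop.
--
--     Return:
--       List of indices.
--     """
--     ret = []
--     for i, v in enumerate(header):
--         n = len(ret)
--         if n >= len(columns):
--             break
--         if v == columns[n]:
--             ret.append(i)
--     return ret
-- ===== SOURCE B (Python) =====
-- def header_indices(header, columns):
--     """Find the indices in the header of the given columns."""
--     ret = []
--     start = 0
--     for col in columns: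
--         try:
--             idx = header.index(col, start)
--         except ValueError:
--             break
--         ret.append(idx)
--         start = idx + 1
--     return ret
-- ===== Notes on version B (the rewrite author's own statement) =====
-- stated objective: alternative
-- what changed: B inverts the loop nesting: instead of scanning the header once and comparing each cell against the next unmatched column, B iterates over the columns and for each one searches the header forward from a cursor with list.index, stopping at the first column not found.
import Mathlib
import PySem

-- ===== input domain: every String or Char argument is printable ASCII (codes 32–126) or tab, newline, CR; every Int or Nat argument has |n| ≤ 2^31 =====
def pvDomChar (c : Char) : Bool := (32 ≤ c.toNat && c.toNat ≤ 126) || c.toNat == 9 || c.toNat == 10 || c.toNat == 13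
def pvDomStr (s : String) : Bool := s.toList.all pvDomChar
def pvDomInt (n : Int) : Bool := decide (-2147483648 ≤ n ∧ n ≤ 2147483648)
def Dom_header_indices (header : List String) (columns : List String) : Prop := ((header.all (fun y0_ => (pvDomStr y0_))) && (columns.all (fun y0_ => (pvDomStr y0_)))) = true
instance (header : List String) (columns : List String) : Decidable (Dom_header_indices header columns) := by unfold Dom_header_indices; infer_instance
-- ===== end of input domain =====

-- B inverts the loop nesting: it iterates over the columns, searching the header forward
-- from a cursor, instead of scanning the header comparing against the next unmatched column.

-- ===== PORT A =====
-- A's loop 'for i, v in enumerate(header)' with accumulator ret; break returns ret unchanged.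
def aGo (columns : List String) : List String → Nat → List Int → List Int
  | [], _, ret => ret
  | v :: rest, i, ret =>
      if ret.length ≥ columns.length then ret
      else if columns[ret.length]? = some v then aGo columns rest (i + 1) (ret ++ [(i : Int)])
      else aGo columns rest (i + 1) ret

def header_indices (header : List String) (columns : List String) : List Int :=
  aGo columns header 0 []

-- ===== PORT B =====
-- header.index(col, start): first index ≥ start whose element equals col (none = ValueError).
def scanIdx : List String → String → Nat → Option Nat
  | [], _, _ => none
  | h :: t, c, i => if h = c then some i else scanIdx t c (i + 1)

def bGo (header : List String) : List String → Nat → List Int → List Int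
  | [], _, acc => acc
  | c :: cs, start, acc =>
      match scanIdx (header.drop start) c start with
      | none => acc
      | some j => bGo header cs (j + 1) (acc ++ [(j : Int)])

def header_indices_alt (header : List String) (columns : List String) : List Int :=
  bGo header columns 0 []

-- ===== PRECONDITION & SPEC =====
def Spec_header_indices (header : List String) (columns : List String) (out : List Int) : Prop := out = header_indices_alt header columns
instance (header : List String) (columns : List String) (out : List Int) : Decidable (Spec_header_indices header columns out) := by unfold Spec_header_indices; infer_instance

-- ===== CLAIM (what is proved, stated in full; the proofs are below) =====
def Claim_equal_header_indices : Prop := ∀ (header : List String) (columns : List String), Dom_header_indices header columns → Spec_header_indices header columns (header_indices header columns)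

-- ===== LEMMAS AND PROOFS =====

-- Common greedy spec: match the remaining columns against the header suffix, current index i.
def greedy : List String → Nat → List String → List Int
  | _, _, [] => []
  | [], _, _ :: _ => []
  | h :: hs, i, c :: cs =>
      if h = c then (i : Int) :: greedy hs (i + 1) cs else greedy hs (i + 1) (c :: cs)

theorem greedy_nil_cols (hs : List String) (i : Nat) : greedy hs i [] = [] := by
  cases hs <;> rfl

theorem greedy_nil_hs (i : Nat) (cs : List String) : greedy [] i cs = [] := by
  cases cs <;> rfl

theorem aGo_eq_greedy (columns : List String) (hs : List String) :
    ∀ (i : Nat) (ret : List Int),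
      aGo columns hs i ret = ret ++ greedy hs i (columns.drop ret.length) := by
  induction hs with
  | nil => intro i ret; simp [aGo, greedy_nil_hs]
  | cons v rest ih =>
    intro i ret
    by_cases hlen : ret.length ≥ columns.length
    · have hdrop : columns.drop ret.length = [] := List.drop_eq_nil_of_le hlen
      simp [aGo, hlen, hdrop, greedy]
    · have hlt : ret.length < columns.length := by omega
      have hdrop : columns.drop ret.length =
          columns[ret.length] :: columns.drop (ret.length + 1) :=
        (List.getElem_cons_drop hlt).symm
      have hget : columns[ret.length]? = some columns[ret.length] :=
        List.getElem?_eq_some_iff.mpr ⟨hlt, rfl⟩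
      by_cases hv : columns[ret.length] = v
      · have : columns[ret.length]? = some v := by rw [hget, hv]
        simp only [aGo, if_neg hlen, if_pos this]
        rw [ih (i + 1) (ret ++ [(i : Int)])]
        simp [hdrop, greedy, hv]
      · have hne : ¬ columns[ret.length]? = some v := by
          rw [hget]; simp [hv]
        simp only [aGo, if_neg hlen, if_neg hne]
        rw [hdrop]
        simp only [greedy, if_neg (fun h => hv (Eq.symm h))]
        rw [← hdrop]
        exact ih (i + 1) ret

theorem greedy_scan (header : List String) (c : String) (cs : List String) :
    ∀ (hs : List String) (i : Nat), hs = header.drop i →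
      greedy hs i (c :: cs) =
        match scanIdx hs c i with
        | none => []
        | some j => (j : Int) :: greedy (header.drop (j + 1)) (j + 1) cs := by
  intro hs
  induction hs with
  | nil => intro i _; rfl
  | cons h t ih =>
    intro i hdrop
    have ht : t = header.drop (i + 1) := by
      rw [List.drop_add_one_eq_tail_drop, ← hdrop]; rfl
    by_cases hc : h = c
    · simp [greedy, scanIdx, hc, ← ht]
    · simp only [greedy, scanIdx, if_neg hc]
      exact ih (i + 1) ht

theorem bGo_eq_greedy (header : List String) :
    ∀ (cs : List String) (i : Nat) (acc : List Int),
      bGo header cs i acc = acc ++ greedy (header.drop i) i cs := by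
  intro cs
  induction cs with
  | nil => intro i acc; simp [bGo, greedy_nil_cols]
  | cons c cs' ih =>
    intro i acc
    rw [greedy_scan header c cs' (header.drop i) i rfl]
    cases hscan : scanIdx (header.drop i) c i with
    | none => simp [bGo, hscan]
    | some j =>
      simp only [bGo, hscan]
      rw [ih (j + 1) (acc ++ [(j : Int)])]
      simp

-- ===== VERDICT (by name: the statement is the Claim_ definition above) =====
theorem header_indices_spec : Claim_equal_header_indices := by
  intro header columns _
  show header_indices header columns = header_indices_alt header columns
  rw [header_indices, header_indices_alt, aGo_eq_greedy, bGo_eq_greedy]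
  simp
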